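-- pv_equiv track=rewrite | github.com/AvalonLucero/UTPB-COSC-6350-Project4 | four_way_handshake.py | simplify_aes_decrypt
-- ===== SOURCE A (Python) =====
-- def xor_bytes(byte_data, key):
--     """Perform XOR between byte data and key (simplified)."""
--     return [b ^ key for b in byte_data]
--
-- def simplify_aes_decrypt(session_key, encrypted_data):
--     """Decrypt the encrypted data using the same simplified AES-like approach."""
--     rounds = 5
--     byte_data = encrypted_data
--
--     # Reverse rounds (rotate and XOR back)
--     for _ in range(rounds):
--         byte_data = byte_data[-1:] + byte_data[:-1]  # Rotate right by 1
--         byte_data = xor_bytes(byte_data, session_key)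
--
--     # Final XOR with the session key
--     byte_data = xor_bytes(byte_data, session_key)
--
--     return ''.join(chr(b) for b in byte_data)
-- ===== SOURCE B (Python) =====
-- def simplify_aes_decrypt(session_key, encrypted_data):
--     """Closed form: the six XORs with session_key cancel, and the five
--     right-rotations compose into one rotation by 5 % n."""
--     n = len(encrypted_data)
--     if n == 0:
--         return ''
--     shift = 5 % n
--     rotated = encrypted_data[-shift:] + encrypted_data[:-shift]
--     return ''.join(chr(b) for b in rotated)
-- ===== Notes on version B (the rewrite author's own statement) =====
-- stated objective: simpler
-- what changed: B replaces the 5-round rotate-and-XOR loop plus final XOR by a single closed-form rotation: the six XORs with session_key cancel and the five right-rotations by 1 compose into one rotation by 5 % n.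
-- outside the precondition, e.g. on simplify_aes_decrypt(0, [-1]): A raises ValueError, B raises ValueError
import Mathlib
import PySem

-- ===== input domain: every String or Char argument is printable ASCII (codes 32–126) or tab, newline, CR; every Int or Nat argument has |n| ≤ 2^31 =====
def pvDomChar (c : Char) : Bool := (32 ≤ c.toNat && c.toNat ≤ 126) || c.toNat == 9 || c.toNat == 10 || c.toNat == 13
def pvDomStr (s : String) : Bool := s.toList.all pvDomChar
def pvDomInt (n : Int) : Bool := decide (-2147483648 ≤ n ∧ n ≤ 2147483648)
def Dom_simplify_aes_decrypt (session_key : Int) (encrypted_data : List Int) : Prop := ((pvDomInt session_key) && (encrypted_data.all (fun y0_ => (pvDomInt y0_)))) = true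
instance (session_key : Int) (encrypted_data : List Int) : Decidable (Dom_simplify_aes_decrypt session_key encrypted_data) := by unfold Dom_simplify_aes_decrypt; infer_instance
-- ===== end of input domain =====

-- B replaces A's 5-round rotate-and-XOR loop plus final XOR by one closed-form rotation by 5 % n
-- (the six XORs with session_key cancel); objective: simpler.

-- ===== PORT A =====
-- helper: xor_bytes(byte_data, key) = [b ^ key for b in byte_data]
def xor_bytes (byte_data : List Int) (key : Int) : List Int :=
  byte_data.map (fun b => PySem.Int.bxor b key)

def simplify_aes_decrypt (session_key : Int) (encrypted_data : List Int) : String :=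
  let rounds := 5
  let byte_data := encrypted_data
  -- for _ in range(rounds): byte_data = byte_data[-1:] + byte_data[:-1]; byte_data = xor_bytes(byte_data, session_key)
  let byte_data := (List.range rounds).foldl
    (fun bd _ =>
      xor_bytes (PySem.List.slice bd (some (-1)) none ++ PySem.List.slice bd none (some (-1))) session_key)
    byte_data
  -- final XOR with the session key
  let byte_data := xor_bytes byte_data session_key
  -- ''.join(chr(b) for b in byte_data); Char.ofNat b.toNat is exact for chr under Pre_ (valid Unicode scalar values)
  String.mk (byte_data.map (fun b => Char.ofNat b.toNat))

-- ===== PORT B =====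
def simplify_aes_decrypt_alt (session_key : Int) (encrypted_data : List Int) : String :=
  let n := encrypted_data.length
  if n = 0 then ""
  else
    let shift := PySem.Int.mod 5 (n : Int)
    let rotated := PySem.List.slice encrypted_data (some (-shift)) none
                   ++ PySem.List.slice encrypted_data none (some (-shift))
    String.mk (rotated.map (fun b => Char.ofNat b.toNat))

-- ===== PRECONDITION & SPEC =====
-- Pre_ excludes lists containing an element that is not a Unicode scalar value: on negative or ≥ 0x110000
-- elements Python's chr raises ValueError, and on surrogate code points (0xD800–0xDFFF) A returns a str
-- that a Lean String cannot represent.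
def Pre_simplify_aes_decrypt (session_key : Int) (encrypted_data : List Int) : Prop :=
  encrypted_data.all (fun b => (decide (0 ≤ b) && decide (b < 55296)) || (decide (57343 < b) && decide (b < 1114112))) = true
instance (session_key : Int) (encrypted_data : List Int) : Decidable (Pre_simplify_aes_decrypt session_key encrypted_data) := by unfold Pre_simplify_aes_decrypt; infer_instance

def pvWitness_simplify_aes_decrypt : Int × List Int := (7, [72, 105, 33])

def Spec_simplify_aes_decrypt (session_key : Int) (encrypted_data : List Int) (out : String) : Prop := out = simplify_aes_decrypt_alt session_key encrypted_data
instance (session_key : Int) (encrypted_data : List Int) (out : String) : Decidable (Spec_simplify_aes_decrypt session_key encrypted_data out) := by unfold Spec_simplify_aes_decrypt; infer_instance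

-- ===== CLAIM (what is proved, stated in full; the proofs are below) =====
def Claim_equal_simplify_aes_decrypt : Prop := ∀ (session_key : Int) (encrypted_data : List Int), Dom_simplify_aes_decrypt session_key encrypted_data → Pre_simplify_aes_decrypt session_key encrypted_data → Spec_simplify_aes_decrypt session_key encrypted_data (simplify_aes_decrypt session_key encrypted_data)

-- ===== LEMMAS AND PROOFS =====

-- XOR with the same key twice is the identity (Python's infinite two's-complement XOR).
theorem pv_bxor_cancel (a k : Int) : PySem.Int.bxor (PySem.Int.bxor a k) k = a := by
  unfold PySem.Int.bxor
  split_ifs <;>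
    first
      | omega
      | (ring_nf; simp only [Int.toNat_natCast, Nat.xor_xor_cancel_right]; omega)
      | (simp only [show ∀ t : Nat, -(-(t:Int) - 1) - 1 = (t:Int) from fun t => by ring,
          Int.toNat_natCast, Nat.xor_xor_cancel_right]; omega)

theorem pv_map_cancel (l : List Int) (k : Int) :
    (l.map (fun b => PySem.Int.bxor b k)).map (fun b => PySem.Int.bxor b k) = l := by
  rw [List.map_map]
  simp [Function.comp_def, pv_bxor_cancel]

-- A's "rotate right by 1" (xs[-1:] + xs[:-1]) is List.rotate by length - 1.
theorem pv_rot_eq (l : List Int) :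
    PySem.List.slice l (some (-1)) none ++ PySem.List.slice l none (some (-1))
      = l.rotate (l.length - 1) := by
  rw [PySem.List.slice_from_neg_one, PySem.List.slice_to_neg_one, List.dropLast_eq_take,
    List.rotate_eq_drop_append_take (by omega)]

-- Five left-rotations by n-1 equal one left-rotation by n - 5 % n, modulo n.
theorem pv_mod_key (n : Nat) (hn : 0 < n) :
    (5 * (n - 1)) % n = (n - 5 % n) % n := by
  have hd := Nat.div_add_mod 5 n
  have h3 : 5 % n < n := Nat.mod_lt _ hn
  have h1 : (5 * (n - 1) + 5) % n = ((n - 5 % n) + 5) % n := by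
    rw [show 5 * (n - 1) + 5 = n * 5 from by omega,
        show (n - 5 % n) + 5 = n * (5 / n) + n from by omega,
        Nat.mul_mod_right]
    simp [Nat.add_mod, Nat.mul_mod_right]
  exact Nat.ModEq.add_right_cancel' 5 h1

-- ===== VERDICT (by name: the statement is the Claim_ definition above) =====
theorem simplify_aes_decrypt_spec : Claim_equal_simplify_aes_decrypt := by
  intro session_key encrypted_data _dom _pre
  unfold Spec_simplify_aes_decrypt simplify_aes_decrypt simplify_aes_decrypt_alt
  simp only [show List.range 5 = [0,1,2,3,4] from rfl, List.foldl_cons, List.foldl_nil,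
    xor_bytes, pv_rot_eq, List.map_rotate, List.length_rotate, List.length_map,
    pv_map_cancel, List.rotate_rotate]
  rcases eq_or_ne encrypted_data.length 0 with h0 | h0
  · rw [if_pos h0]
    rw [List.length_eq_zero_iff.mp h0]
    rfl
  · rw [if_neg h0]
    have hn : 0 < encrypted_data.length := Nat.pos_of_ne_zero h0
    have hmod : PySem.Int.mod 5 (encrypted_data.length : Int) = ((5 % encrypted_data.length : Nat) : Int) := by
      exact_mod_cast PySem.Int.mod_natCast 5 encrypted_data.length
    rw [hmod]
    rcases Nat.eq_zero_or_pos (5 % encrypted_data.length) with hs | hs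
    · rw [hs]
      simp only [Nat.cast_zero, neg_zero]
      rw [PySem.List.slice_zero_start, PySem.List.slice_none_none,
        PySem.List.slice_to encrypted_data (le_refl 0)]
      simp only [Int.toNat_zero, List.take_zero, List.append_nil]
      rw [show encrypted_data.length - 1 + (encrypted_data.length - 1) + (encrypted_data.length - 1) +
            (encrypted_data.length - 1) + (encrypted_data.length - 1) = 5 * (encrypted_data.length - 1) from by omega]
      conv_lhs => rw [← List.rotate_mod]
      simp only [List.length_map]
      rw [pv_mod_key encrypted_data.length hn, hs, Nat.sub_zero, Nat.mod_self, List.rotate_zero]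
    · rw [PySem.List.slice_from_neg_natCast _ _ hs, PySem.List.slice_to_neg_natCast _ _ hs,
        ← List.rotate_eq_drop_append_take (by omega), List.map_rotate]
      rw [show encrypted_data.length - 1 + (encrypted_data.length - 1) + (encrypted_data.length - 1) +
            (encrypted_data.length - 1) + (encrypted_data.length - 1) = 5 * (encrypted_data.length - 1) from by omega]
      conv_lhs => rw [← List.rotate_mod]
      conv_rhs => rw [← List.rotate_mod]
      simp only [List.length_map]
      rw [pv_mod_key encrypted_data.length hn]
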